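-- pv_equiv track=rewrite | github.com/zmbksyyr/ssq | py/ssq_analyzer.py | filter_consecutive_numbers
-- ===== SOURCE A (Python) =====
-- def filter_consecutive_numbers(r):
--     """规则4: 过滤连号。不允许出现过多的连号。
--        逻辑: 不允许出现3组连号，也不允许出现4连号及以上的情况。
--        返回: True=保留, False=过滤
--     """
--     groups = 0      # 连号的组数
--     max_c = 0       # 最大连号的长度
--     current_c = 1   # 当前正在计算的连号长度
--     for i in range(len(r) - 1):
--         if r[i+1] - r[i] == 1:
--             current_c += 1
--         else:
--             if current_c >= 2: # 如果前一个数字是连号的结尾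
--                 groups += 1
--                 max_c = max(max_c, current_c)
--             current_c = 1 # 重置连号计数
--     if current_c >= 2: # 检查最后一组数是否是连号
--         groups += 1
--         max_c = max(max_c, current_c)
--     # 如果连号组数>=3 或 最大连号长度>=4，则过滤掉
--     return not (groups >= 3 or max_c >= 4)
-- ===== SOURCE B (Python) =====
-- def filter_consecutive_numbers(r):
--     """Rule 4 re-implemented: count run-starts among adjacent diffs and
--     detect any window of three consecutive diffs equal to 1 (= a 4-run),
--     instead of maintaining run-length state through one loop."""
--     diffs = [b - a for a, b in zip(r, r[1:])]
--     starts = sum(1 for prev, d in zip([None] + diffs, diffs)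
--                  if d == 1 and prev != 1)
--     has4 = any(x == 1 and y == 1 and z == 1
--                for x, y, z in zip(diffs, diffs[1:], diffs[2:]))
--     return starts < 3 and not has4
-- ===== Notes on version B (the rewrite author's own statement) =====
-- stated objective: alternative
-- what changed: A maintains run-length state (groups, max_c, current_c) through one index loop; B instead builds the adjacent-difference list and answers with two independent passes: counting run-starts (a diff of 1 not preceded by a diff of 1) and testing any window of three consecutive diffs equal to 1.
import Mathlib
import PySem

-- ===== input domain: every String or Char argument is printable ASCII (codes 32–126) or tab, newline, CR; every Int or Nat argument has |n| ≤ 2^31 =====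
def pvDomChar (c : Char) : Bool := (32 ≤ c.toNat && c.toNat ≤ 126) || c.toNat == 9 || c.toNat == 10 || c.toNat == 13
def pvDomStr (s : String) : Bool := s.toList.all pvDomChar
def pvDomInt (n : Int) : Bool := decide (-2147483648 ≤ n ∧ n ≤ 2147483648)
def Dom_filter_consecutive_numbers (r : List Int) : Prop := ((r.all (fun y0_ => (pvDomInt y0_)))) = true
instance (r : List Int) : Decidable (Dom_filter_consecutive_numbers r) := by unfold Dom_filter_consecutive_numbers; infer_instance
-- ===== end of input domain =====

-- B replaces A's one-loop run-length state machine by two independent passes over the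
-- adjacent-difference list (count run-starts; test for a window of three 1-diffs); same cost.

-- ===== PORT A =====
-- Python's `for i in range(len(r)-1)` reading r[i] and r[i+1] is ported as a fold over the
-- list of adjacent pairs: the loop body sees exactly the values (r[i], r[i+1]) in the same order.
def filter_consecutive_numbers (r : List Int) : Bool :=
  let st := (r.zip r.tail).foldl
    (fun (st : Int × Int × Int) (p : Int × Int) =>
      if p.2 - p.1 = 1 then (st.1, st.2.1, st.2.2 + 1)
      else if st.2.2 ≥ 2 then (st.1 + 1, max st.2.1 st.2.2, 1)
      else (st.1, st.2.1, 1)) (0, 0, 1)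
  let st2 := if st.2.2 ≥ 2 then (st.1 + 1, max st.2.1 st.2.2) else (st.1, st.2.1)
  !(decide (st2.1 ≥ 3) || decide (st2.2 ≥ 4))

-- ===== PORT B =====
-- diffs = [b-a for a,b in zip(r, r[1:])]; zip([None]+diffs, diffs) pairs each diff with its
-- predecessor (None for the first); zip(diffs, diffs[1:], diffs[2:]) as nested zips.
def filter_consecutive_numbers_alt (r : List Int) : Bool :=
  let diffs := (r.zip r.tail).map (fun p => p.2 - p.1)
  let starts := ((List.zip ((none : Option Int) :: diffs.map some) diffs).filter
      (fun q => q.2 == 1 && q.1 != some 1)).length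
  let has4 := (List.zip (diffs.zip diffs.tail) diffs.tail.tail).any
      (fun t => t.1.1 == 1 && t.1.2 == 1 && t.2 == 1)
  decide (starts < 3) && !has4

-- ===== PRECONDITION & SPEC =====
def Spec_filter_consecutive_numbers (r : List Int) (out : Bool) : Prop := out = filter_consecutive_numbers_alt r
instance (r : List Int) (out : Bool) : Decidable (Spec_filter_consecutive_numbers r out) := by unfold Spec_filter_consecutive_numbers; infer_instance

-- ===== CLAIM (what is proved, stated in full; the proofs are below) =====
def Claim_equal_filter_consecutive_numbers : Prop := ∀ (r : List Int), Dom_filter_consecutive_numbers r → Spec_filter_consecutive_numbers r (filter_consecutive_numbers r)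

-- ===== LEMMAS AND PROOFS =====

-- A's loop body, seen as a step on a single difference value
def stepD (st : Int × Int × Int) (d : Int) : Int × Int × Int :=
  if d = 1 then (st.1, st.2.1, st.2.2 + 1)
  else if st.2.2 ≥ 2 then (st.1 + 1, max st.2.1 st.2.2, 1)
  else (st.1, st.2.1, 1)

-- A's final flush of the loop state
def flush (st : Int × Int × Int) : Int × Int :=
  if st.2.2 ≥ 2 then (st.1 + 1, max st.2.1 st.2.2) else (st.1, st.2.1)

-- groups / max_c produced by A's loop (including the final flush), as structural recursions
def gcount : Int → List Int → Int
  | c, [] => if c ≥ 2 then 1 else 0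
  | c, d :: ds => if d = 1 then gcount (c + 1) ds else (if c ≥ 2 then 1 else 0) + gcount 1 ds

def mcount : Int → List Int → Int
  | c, [] => if c ≥ 2 then c else 0
  | c, d :: ds => if d = 1 then mcount (c + 1) ds else max (if c ≥ 2 then c else 0) (mcount 1 ds)

-- B's run-start count, as a structural recursion on the diff list
def scount : Option Int → List Int → Nat
  | _, [] => 0
  | p, d :: ds => (if d = 1 ∧ p ≠ some 1 then 1 else 0) + scount (some d) ds

-- B's three-in-a-row test, as a structural recursion on the diff list
def hrun : List Int → Bool
  | [] => false
  | [_] => false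
  | [_, _] => false
  | a :: b :: c :: ds => (a == 1 && b == 1 && c == 1) || hrun (b :: c :: ds)

-- length of the maximal prefix of 1s
def ones : List Int → Nat
  | [] => 0
  | d :: ds => if d = 1 then ones ds + 1 else 0

lemma mcount_nonneg : ∀ (ds : List Int) (c : Int), 0 ≤ mcount c ds := by
  intro ds
  induction ds with
  | nil => intro c; simp only [mcount]; split_ifs <;> omega
  | cons d ds ih =>
      intro c; simp only [mcount]; split_ifs
      · exact ih (c + 1)
      all_goals exact le_max_of_le_right (ih 1)

lemma fold_char : ∀ (ds : List Int) (g m c : Int), 0 ≤ m →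
    flush (ds.foldl stepD (g, m, c)) = (g + gcount c ds, max m (mcount c ds)) := by
  intro ds
  induction ds with
  | nil =>
      intro g m c hm
      simp only [List.foldl_nil, flush, gcount, mcount]
      split_ifs with h
      · simp
      · simp [max_eq_left hm]
  | cons d ds ih =>
      intro g m c hm
      simp only [List.foldl_cons]
      by_cases hd : d = 1
      · rw [show stepD (g, m, c) d = (g, m, c + 1) from by simp [stepD, hd]]
        rw [ih g m (c + 1) hm]
        simp [gcount, mcount, hd]
      · by_cases hc2 : c ≥ 2
        · rw [show stepD (g, m, c) d = (g + 1, max m c, 1) from by simp [stepD, hd, hc2]]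
          rw [ih (g + 1) (max m c) 1 (le_max_of_le_left hm)]
          rw [show gcount c (d :: ds) = 1 + gcount 1 ds from by simp [gcount, hd, hc2]]
          rw [show mcount c (d :: ds) = max c (mcount 1 ds) from by simp [mcount, hd, hc2]]
          simp only [Prod.mk.injEq]
          exact ⟨by ring, by rw [max_assoc]⟩
        · rw [show stepD (g, m, c) d = (g, m, 1) from by simp [stepD, hd, hc2]]
          rw [ih g m 1 hm]
          rw [show gcount c (d :: ds) = 0 + gcount 1 ds from by simp [gcount, hd, hc2]]
          rw [show mcount c (d :: ds) = max 0 (mcount 1 ds) from by simp [mcount, hd, hc2]]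
          rw [max_eq_right (mcount_nonneg ds 1)]
          simp only [Prod.mk.injEq]
          exact ⟨by omega, trivial⟩

lemma scount_eq : ∀ (ds : List Int) (p : Option Int),
    ((List.zip (p :: ds.map some) ds).filter
      (fun q => q.2 == 1 && q.1 != some 1)).length = scount p ds := by
  intro ds
  induction ds with
  | nil => intro p; simp [scount]
  | cons d ds ih =>
      intro p
      simp only [List.map_cons, List.zip_cons_cons, List.filter_cons, scount]
      by_cases h : d = 1 ∧ p ≠ some 1
      · have hb : ((d == 1 && p != some 1) = true) := by
          simp [h.1, bne_iff_ne, h.2]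
        simp [hb, ih, h, Nat.add_comm]
      · have hb : ((d == 1 && p != some 1) = false) := by
          rcases Decidable.not_and_iff_not_or_not.mp h with h1 | h2
          · simp [h1]
          · simp only [Decidable.not_not] at h2
            simp [h2]
        simp [hb, ih, h]

lemma gcount_scount : ∀ ds : List Int,
    (∀ c : Int, 2 ≤ c → gcount c ds = 1 + (scount (some 1) ds : Int)) ∧
    (∀ p : Option Int, p ≠ some 1 → gcount 1 ds = (scount p ds : Int)) := by
  intro ds
  induction ds with
  | nil =>
      constructor
      · intro c hc; simp only [gcount, scount]; rw [if_pos hc]; simp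
      · intro p _; simp [gcount, scount]
  | cons d ds ih =>
      obtain ⟨H1, H2⟩ := ih
      constructor
      · intro c hc
        by_cases hd : d = 1
        · rw [show gcount c (d :: ds) = gcount (c + 1) ds from by
            simp [gcount, hd, if_pos]]
          rw [H1 (c + 1) (by omega)]
          rw [show scount (some 1) (d :: ds) = scount (some 1) ds from by
            simp [scount, hd]]
        · rw [show gcount c (d :: ds) = (if c ≥ 2 then 1 else 0) + gcount 1 ds from by
            simp [gcount, hd]]
          rw [H2 (some d) (by simp [hd])]
          rw [show scount (some 1) (d :: ds) = scount (some d) ds from by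
            simp [scount, hd]]
          rw [if_pos hc]
      · intro p hp
        by_cases hd : d = 1
        · rw [show gcount 1 (d :: ds) = gcount 2 ds from by norm_num [gcount, hd]]
          rw [H1 2 (by omega)]
          rw [show scount p (d :: ds) = 1 + scount (some 1) ds from by
            simp [scount, hd, hp]]
          push_cast
          ring
        · rw [show gcount 1 (d :: ds) = gcount 1 ds from by norm_num [gcount, hd]]
          rw [H2 (some d) (by simp [hd])]
          rw [show scount p (d :: ds) = scount (some d) ds from by simp [scount, hd]]

lemma hrun_zip_eq : ∀ ds : List Int,
    (List.zip (ds.zip ds.tail) ds.tail.tail).any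
      (fun t => t.1.1 == 1 && t.1.2 == 1 && t.2 == 1) = hrun ds := by
  intro ds
  match ds with
  | [] => simp [hrun]
  | [_] => simp [hrun]
  | [_, _] => simp [hrun]
  | a :: b :: c :: t =>
      have ih := hrun_zip_eq (b :: c :: t)
      simp only [List.tail_cons, List.zip_cons_cons, List.any_cons] at ih ⊢
      rw [ih]
      simp [hrun]

lemma ones_shape : ∀ ds : List Int, 3 ≤ ones ds → ∃ t, ds = 1 :: 1 :: 1 :: t := by
  intro ds h
  match ds, h with
  | [], h => simp [ones] at h
  | [d], h =>
      exfalso; simp only [ones] at h; split_ifs at h <;> omega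
  | [d, e], h =>
      exfalso; simp only [ones] at h; split_ifs at h <;> omega
  | d :: e :: f :: t, h =>
      simp only [ones] at h
      split_ifs at h with h1 h2 h3 <;> try omega
      exact ⟨t, by rw [h1, h2, h3]⟩

lemma hrun_cons_one : ∀ ds : List Int,
    hrun (1 :: ds) = true ↔ (2 ≤ ones ds ∨ hrun ds = true) := by
  intro ds
  match ds with
  | [] => simp [hrun, ones]
  | [d] =>
      by_cases hd : d = 1 <;> simp [hrun, ones, hd]
  | b :: c :: t =>
      by_cases hb : b = 1 <;> by_cases hc : c = 1 <;>
        simp [hrun, ones, hb, hc] <;> omega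

lemma hrun_cons_ne : ∀ (d : Int) (ds : List Int), d ≠ 1 → hrun (d :: ds) = hrun ds := by
  intro d ds hd
  match ds with
  | [] => simp [hrun]
  | [_] => simp [hrun]
  | b :: c :: t => simp [hrun, hd]

lemma mcount_char : ∀ (ds : List Int) (c : Int), 1 ≤ c →
    (4 ≤ mcount c ds ↔ (4 ≤ c + (ones ds : Int) ∨ hrun ds = true)) := by
  intro ds
  induction ds with
  | nil =>
      intro c hc
      simp only [mcount, ones, hrun]
      split_ifs <;> simp <;> omega
  | cons d ds ih =>
      intro c hc
      by_cases hd : d = 1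
      · rw [show mcount c (d :: ds) = mcount (c + 1) ds from by simp [mcount, hd]]
        rw [show ones (d :: ds) = ones ds + 1 from by simp [ones, hd]]
        rw [show (hrun (d :: ds) = true) ↔ (hrun (1 :: ds) = true) from by rw [hd]]
        rw [ih (c + 1) (by omega), hrun_cons_one ds]
        cases h : hrun ds <;> simp [h] <;> omega
      · rw [show mcount c (d :: ds) = max (if c ≥ 2 then c else 0) (mcount 1 ds) from by
          simp [mcount, hd]]
        rw [show ones (d :: ds) = 0 from by simp [ones, hd]]
        rw [le_max_iff, ih 1 (by omega), hrun_cons_ne d ds hd]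
        have hsh : 3 ≤ ones ds → hrun ds = true := by
          intro h3
          obtain ⟨t, ht⟩ := ones_shape ds h3
          rw [ht]; simp [hrun]
        cases h : hrun ds <;> simp [h] at hsh ⊢ <;> split_ifs <;> omega

-- ===== VERDICT (by name: the statement is the Claim_ definition above) =====
theorem filter_consecutive_numbers_spec : Claim_equal_filter_consecutive_numbers := by
  intro r _
  unfold Spec_filter_consecutive_numbers filter_consecutive_numbers filter_consecutive_numbers_alt
  set ds : List Int := (r.zip r.tail).map (fun p => p.2 - p.1) with hds
  have hfold : (r.zip r.tail).foldl
      (fun (st : Int × Int × Int) (p : Int × Int) =>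
        if p.2 - p.1 = 1 then (st.1, st.2.1, st.2.2 + 1)
        else if st.2.2 ≥ 2 then (st.1 + 1, max st.2.1 st.2.2, 1)
        else (st.1, st.2.1, 1)) (0, 0, 1) = ds.foldl stepD (0, 0, 1) := by
    rw [hds, List.foldl_map]; rfl
  simp only [hfold]
  have hchar := fold_char ds 0 0 1 le_rfl
  simp only [flush] at hchar
  rw [hchar]
  rw [max_eq_right (mcount_nonneg ds 1)]
  have hg : gcount 1 ds = (scount none ds : Int) := (gcount_scount ds).2 none (by simp)
  have hm : (4 ≤ mcount 1 ds) ↔ hrun ds = true := by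
    rw [mcount_char ds 1 le_rfl]
    constructor
    · rintro (h | h)
      · obtain ⟨t, ht⟩ := ones_shape ds (by omega)
        rw [ht]; simp [hrun]
      · exact h
    · exact Or.inr
  have hdm : decide (4 ≤ mcount 1 ds) = hrun ds := by
    cases hh : hrun ds
    · exact decide_eq_false (by simp [hh] at hm; omega)
    · exact decide_eq_true (hm.mpr hh)
  have hdg : decide ((3 : Int) ≤ gcount 1 ds) = !decide (scount none ds < 3) := by
    rw [hg]
    by_cases h : scount none ds < 3 <;> simp [h] <;> omega
  rw [scount_eq ds none, hrun_zip_eq ds]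
  simp only [zero_add, ge_iff_le, hdm, hdg, Bool.not_or, Bool.not_not]
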